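-- pv_equiv track=rewrite | github.com/chenrookie96/GCI- | src/algorithms/drl_tsbc.py | balance_timetable
-- ===== SOURCE A (Python) =====
-- from typing import Tuple, List, Dict, Any
--
-- def balance_timetable(up_departures: List[int], down_departures: List[int],
--                      service_end: int) -> Tuple[List[int], List[int]]:
--     """
--     最终调整确保上下行发车次数相等（论文中的修正算法）
--
--     Args:
--         up_departures: 上行发车时间列表
--         down_departures: 下行发车时间列表
--         service_end: 服务结束时间
--
--     Returns:
--         调整后的(上行发车时间, 下行发车时间)
--     """
--     up_count = len(up_departures)
--     down_count = len(down_departures)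
--
--     if up_count == down_count:
--         return up_departures, down_departures
--
--     # 如果上行多，删除一些上行发车
--     if up_count > down_count:
--         diff = up_count - down_count
--         # 删除间隔最小的发车（优化服务质量）
--         up_departures_sorted = sorted(up_departures)
--         intervals = [up_departures_sorted[i+1] - up_departures_sorted[i]
--                     for i in range(len(up_departures_sorted)-1)]
--         # 找到间隔最小的发车并删除
--         to_remove = []
--         for _ in range(diff):
--             if len(intervals) > 0:
--                 min_idx = intervals.index(min(intervals))
--                 to_remove.append(up_departures_sorted[min_idx+1])
--                 # 更新间隔列表
--                 if min_idx < len(intervals) - 1: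
--                     intervals[min_idx] = up_departures_sorted[min_idx+2] - up_departures_sorted[min_idx]
--                 intervals.pop(min_idx+1 if min_idx+1 < len(intervals) else min_idx)
--                 up_departures_sorted.pop(min_idx+1)
--         up_departures = [t for t in up_departures if t not in to_remove]
--
--     # 如果下行多，删除一些下行发车
--     elif down_count > up_count:
--         diff = down_count - up_count
--         down_departures_sorted = sorted(down_departures)
--         intervals = [down_departures_sorted[i+1] - down_departures_sorted[i]
--                     for i in range(len(down_departures_sorted)-1)]
--         to_remove = []
--         for _ in range(diff):
--             if len(intervals) > 0:
--                 min_idx = intervals.index(min(intervals))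
--                 to_remove.append(down_departures_sorted[min_idx+1])
--                 if min_idx < len(intervals) - 1:
--                     intervals[min_idx] = down_departures_sorted[min_idx+2] - down_departures_sorted[min_idx]
--                 intervals.pop(min_idx+1 if min_idx+1 < len(intervals) else min_idx)
--                 down_departures_sorted.pop(min_idx+1)
--         down_departures = [t for t in down_departures if t not in to_remove]
--
--     return sorted(up_departures), sorted(down_departures)
-- ===== SOURCE B (Python) =====
-- from typing import Tuple, List
--
-- def _insort(pending: list, entry) -> None:
--     """Insert entry into pending (kept in decreasing order), scanning from the end."""
--     i = len(pending)
--     while i > 0 and pending[i - 1] < entry: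
--         i -= 1
--     pending.insert(i, entry)
--
-- def _removal_values(times: List[int], k: int) -> List[int]:
--     """Values dropped by the greedy 'delete right endpoint of the leftmost smallest
--     adjacent gap' process, computed with a priority list of (gap, left-index) entries
--     popped smallest-first, lazy invalidation of stale entries, and a successor map
--     (linked list) so a merge is O(1) plus one ordered insertion — no rescan of the
--     schedule per round."""
--     s = sorted(times)
--     n = len(s)
--     nxt = {i: i + 1 for i in range(n - 1)}
--     pending = sorted(((s[i + 1] - s[i], i) for i in range(n - 1)), reverse=True)
--     removed = []
--     while k > 0 and pending:
--         g, i = pending.pop()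
--         j = nxt.get(i)
--         if j is None or s[j] - s[i] != g:
--             continue  # stale entry: that gap no longer exists
--         removed.append(s[j])
--         jj = nxt.pop(j, None)
--         if jj is None:
--             del nxt[i]
--         else:
--             nxt[i] = jj
--             _insort(pending, (s[jj] - s[i], i))
--         k -= 1
--     return removed
--
-- def balance_timetable(up_departures: List[int], down_departures: List[int],
--                       service_end: int) -> Tuple[List[int], List[int]]:
--     if len(up_departures) == len(down_departures):
--         return up_departures, down_departures
--     if len(up_departures) > len(down_departures):
--         drop = set(_removal_values(up_departures, len(up_departures) - len(down_departures)))
--         up_departures = [t for t in up_departures if t not in drop]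
--     else:
--         drop = set(_removal_values(down_departures, len(down_departures) - len(up_departures)))
--         down_departures = [t for t in down_departures if t not in drop]
--     return sorted(up_departures), sorted(down_departures)
-- ===== Notes on version B (the rewrite author's own statement) =====
-- stated objective: alternative
-- what changed: A re-scans the maintained intervals array every round with index(min(...)) and patches it in place by index arithmetic; B never rescans: it builds once a priority list of (gap, left-index) entries sorted descending, pops the smallest entry from the end, discards stale entries lazily by checking them against a successor map (linked list over sorted positions), and on an accepted deletion merges the two gaps in O(1) and orderly re-inserts the single merged entry.
import Mathlib
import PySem

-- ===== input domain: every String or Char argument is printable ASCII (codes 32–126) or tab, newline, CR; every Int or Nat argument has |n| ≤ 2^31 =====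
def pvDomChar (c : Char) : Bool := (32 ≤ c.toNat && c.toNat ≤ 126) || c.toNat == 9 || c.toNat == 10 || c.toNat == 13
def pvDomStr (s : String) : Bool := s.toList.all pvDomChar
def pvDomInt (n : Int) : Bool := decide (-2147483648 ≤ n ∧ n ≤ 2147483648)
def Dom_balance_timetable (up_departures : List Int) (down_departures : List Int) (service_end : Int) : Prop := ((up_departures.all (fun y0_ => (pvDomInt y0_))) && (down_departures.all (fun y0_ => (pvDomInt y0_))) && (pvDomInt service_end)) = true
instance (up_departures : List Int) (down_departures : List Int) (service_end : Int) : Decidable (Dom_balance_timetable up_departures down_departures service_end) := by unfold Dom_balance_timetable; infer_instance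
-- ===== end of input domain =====

-- B replaces A's per-round rescan of the intervals array (index(min(...)) + in-place
-- index patching) by a priority list of (gap, left-index) entries kept in decreasing
-- order and popped smallest-first, with lazy invalidation of stale entries against a
-- successor map (linked list over the sorted positions): objective 'alternative'.

-- ===== PORT A =====
-- one iteration of A's `for _ in range(diff)` body; state = (sorted list, intervals, to_remove)
def aTrimStep (st : List Int × List Int × List Int) : List Int × List Int × List Int :=
  let s := st.1
  let intervals := st.2.1
  let rm := st.2.2
  if 0 < intervals.length then
    match PySem.List.min? intervals (fun x => x) with
    | none => st
    | some m =>
      match PySem.List.index? intervals m with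
      | none => st
      | some minIdx =>
        let rm' := rm ++ [PySem.List.pyGetD s ((minIdx : Int) + 1) 0]
        let intervals2 :=
          if (minIdx : Int) < PySem.List.len intervals - 1 then
            PySem.List.pySetD intervals (minIdx : Int)
              (PySem.List.pyGetD s ((minIdx : Int) + 2) 0 - PySem.List.pyGetD s (minIdx : Int) 0)
          else intervals
        let intervals' :=
          match PySem.List.pop? intervals2
              (if (minIdx : Int) + 1 < PySem.List.len intervals2 then (minIdx : Int) + 1 else (minIdx : Int)) with
          | some r => r.2
          | none => intervals2
        let s' :=
          match PySem.List.pop? s ((minIdx : Int) + 1) with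
          | some r => r.2
          | none => s
        (s', intervals', rm')
  else st

-- A's over-represented branch (identical code for up and down): sort, build intervals,
-- run the greedy `diff` times, then filter the original list by the collected values
def aBranch (deps : List Int) (diff : Int) : List Int :=
  let sorted0 := PySem.List.sorted deps (fun x => x) false
  let intervals := (PySem.List.pyRange 0 (PySem.List.len sorted0 - 1) 1).map
      (fun i => PySem.List.pyGetD sorted0 (i + 1) 0 - PySem.List.pyGetD sorted0 i 0)
  let st := (PySem.List.pyRange 0 diff 1).foldl (fun acc _ => aTrimStep acc) (sorted0, intervals, ([] : List Int))
  deps.filter (fun t => !(st.2.2.contains t))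

def balance_timetable (up_departures : List Int) (down_departures : List Int) (service_end : Int) : List Int × List Int :=
  let up_count := PySem.List.len up_departures
  let down_count := PySem.List.len down_departures
  if up_count = down_count then (up_departures, down_departures)
  else if down_count < up_count then
    let up' := aBranch up_departures (up_count - down_count)
    (PySem.List.sorted up' (fun x => x) false, PySem.List.sorted down_departures (fun x => x) false)
  else
    let down' := aBranch down_departures (down_count - up_count)
    (PySem.List.sorted up_departures (fun x => x) false, PySem.List.sorted down' (fun x => x) false)

-- ===== PORT B =====
-- Python's `<` on int pairs (lexicographic), written out
def bLexLt (a b : Int × Int) : Bool := decide (a.1 < b.1 ∨ (a.1 = b.1 ∧ a.2 < b.2))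

-- the scanning-from-the-end `while` loop of Source B's _insort (counter i counts down)
def bInsortPos (pending : List (Int × Int)) (entry : Int × Int) : Nat → Nat
  | 0 => 0
  | i + 1 => if bLexLt (PySem.List.pyGetD pending (i : Int) (0, 0)) entry then bInsortPos pending entry i else i + 1

-- pending.insert(i, entry) at the found position
def bInsort (pending : List (Int × Int)) (entry : Int × Int) : List (Int × Int) :=
  PySem.List.insert pending (bInsortPos pending entry pending.length : Int) entry

-- list.insert always grows the list by one (cited by bLoop's termination proof)
lemma length_pyInsert {α : Type} (xs : List α) (i : Int) (v : α) :
    (PySem.List.insert xs i v).length = xs.length + 1 := by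
  unfold PySem.List.insert
  rcases PySem.List.sliceIndices xs.length (some i) none 1 with ⟨k, a, b⟩
  simp only [List.length_append, List.length_take, List.length_cons, List.length_drop]
  omega

lemma length_bInsort (pending : List (Int × Int)) (entry : Int × Int) :
    (bInsort pending entry).length = pending.length + 1 := by
  unfold bInsort; exact length_pyInsert ..

-- Source B's `while k > 0 and pending:` loop
def bLoop (s : List Int) (k : Nat) (pending : List (Int × Int)) (nxt : PySem.Dict Int Int)
    (removed : List Int) : List Int :=
  if h : 0 < k ∧ pending ≠ [] then
    let e := pending.getLast h.2
    let rest := pending.dropLast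
    match nxt.get? e.2 with
    | none => bLoop s k rest nxt removed
    | some j =>
      if PySem.List.pyGetD s j 0 - PySem.List.pyGetD s e.2 0 ≠ e.1 then
        bLoop s k rest nxt removed
      else
        let removed' := removed ++ [PySem.List.pyGetD s j 0]
        match nxt.get? j with
        | none => bLoop s (k - 1) rest ((nxt.erase j).erase e.2) removed'
        | some jj =>
          bLoop s (k - 1) (bInsort rest (PySem.List.pyGetD s jj 0 - PySem.List.pyGetD s e.2 0, e.2))
            ((nxt.erase j).insert e.2 jj) removed'
  else removed
termination_by 2 * k + pending.length
decreasing_by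
  all_goals
    (have hp := List.length_pos_iff.mpr h.2
     simp only [length_bInsort, List.length_dropLast]
     omega)

-- Source B's _removal_values
def bRemovalValues (times : List Int) (k : Int) : List Int :=
  let s := PySem.List.sorted times (fun x => x) false
  let n := PySem.List.len s
  let nxt := (PySem.List.pyRange 0 (n - 1) 1).foldl (fun d i => d.insert i (i + 1)) PySem.Dict.empty
  let pending := PySem.List.sorted2
      ((PySem.List.pyRange 0 (n - 1) 1).map
        (fun i => (PySem.List.pyGetD s (i + 1) 0 - PySem.List.pyGetD s i 0, i)))
      (fun e => e.1) (fun e => e.2) true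
  bLoop s k.toNat pending nxt []

def balance_timetable_alt (up_departures : List Int) (down_departures : List Int) (service_end : Int) : List Int × List Int :=
  if PySem.List.len up_departures = PySem.List.len down_departures then (up_departures, down_departures)
  else if PySem.List.len down_departures < PySem.List.len up_departures then
    let drop := PySem.Set.ofList (bRemovalValues up_departures (PySem.List.len up_departures - PySem.List.len down_departures))
    let up' := up_departures.filter (fun t => !(PySem.Set.contains drop t))
    (PySem.List.sorted up' (fun x => x) false, PySem.List.sorted down_departures (fun x => x) false)
  else
    let drop := PySem.Set.ofList (bRemovalValues down_departures (PySem.List.len down_departures - PySem.List.len up_departures))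
    let down' := down_departures.filter (fun t => !(PySem.Set.contains drop t))
    (PySem.List.sorted up_departures (fun x => x) false, PySem.List.sorted down' (fun x => x) false)

-- ===== PRECONDITION & SPEC =====
def Spec_balance_timetable (up_departures : List Int) (down_departures : List Int) (service_end : Int) (out : List Int × List Int) : Prop := out = balance_timetable_alt up_departures down_departures service_end
instance (up_departures : List Int) (down_departures : List Int) (service_end : Int) (out : List Int × List Int) : Decidable (Spec_balance_timetable up_departures down_departures service_end out) := by unfold Spec_balance_timetable; infer_instance

-- ===== CLAIM (what is proved, stated in full; the proofs are below) =====
def Claim_equal_balance_timetable : Prop := ∀ (up_departures : List Int) (down_departures : List Int) (service_end : Int), Dom_balance_timetable up_departures down_departures service_end → Spec_balance_timetable up_departures down_departures service_end (balance_timetable up_departures down_departures service_end)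

-- ===== LEMMAS AND PROOFS =====

-- adjacent gaps of a (sorted) list: gaps s = [s[1]-s[0], s[2]-s[1], ...]
def gaps : List Int → List Int
  | a :: b :: t => (b - a) :: gaps (b :: t)
  | _ => []

lemma length_gaps : ∀ s : List Int, (gaps s).length = s.length - 1
  | [] => rfl
  | [_] => rfl
  | _ :: b :: t => by
      have := length_gaps (b :: t)
      simp [gaps] at this ⊢
      omega

lemma gaps_eq_nil (s : List Int) (h : s.length < 2) : gaps s = [] := by
  match s, h with
  | [], _ => rfl
  | [_], _ => rfl

lemma getElem_gaps : ∀ (s : List Int) (k : Nat) (h : k + 1 < s.length) (hg : k < (gaps s).length),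
    (gaps s)[k] = s[k + 1] - s[k]'(by omega)
  | _ :: _ :: _, 0, _, _ => rfl
  | a :: b :: t, k + 1, h, hg => by
      have ih := getElem_gaps (b :: t) k (by simpa using h) (by simp [gaps] at hg ⊢; omega)
      simpa [gaps] using ih

lemma foldl_const_iterate {α β : Type} (g : β → β) :
    ∀ (l : List α) (x : β), l.foldl (fun acc _ => g acc) x = g^[l.length] x
  | [], _ => rfl
  | _ :: l, x => by
      simp only [List.foldl_cons, List.length_cons, Function.iterate_succ_apply]
      exact foldl_const_iterate g l (g x)

-- PySem.List.min? keeps the FIRST element attaining the minimum: index form of that fact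
lemma foldl_min_first {α : Type} (key : α → Int) :
    ∀ (t : List α) (a : α), ∃ (i : Nat) (h : i < (a :: t).length),
      (t.foldl (fun acc x => match acc with
          | none => some x
          | some m => if key x < key m then some x else some m) (some a) = some ((a :: t)[i])) ∧
      ∀ (j : Nat) (hj : j < i), key ((a :: t)[i]) < key ((a :: t)[j]'(lt_trans hj h))
  | [], a => ⟨0, by simp, by simp, by omega⟩
  | b :: t, a => by
      by_cases hb : key b < key a
      · obtain ⟨i, h, hf, hs⟩ := foldl_min_first key t b
        refine ⟨i + 1, by simpa using h, ?_, ?_⟩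
        · simpa [hb] using hf
        · intro j hj
          cases j with
          | zero =>
            cases i with
            | zero => simpa using hb
            | succ i' =>
              have := hs 0 (by omega)
              simp at this ⊢
              exact lt_trans this hb
          | succ j' =>
            have := hs j' (by omega)
            simpa using this
      · obtain ⟨i, h, hf, hs⟩ := foldl_min_first key t a
        cases i with
        | zero =>
          refine ⟨0, by simp, ?_, by omega⟩
          simpa [hb] using hf
        | succ i' =>
          refine ⟨i' + 2, by simpa using h, ?_, ?_⟩
          · simpa [hb] using hf
          · intro j hj
            cases j with
            | zero =>
              have := hs 0 (by omega)
              simpa using this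
            | succ j' =>
              cases j' with
              | zero =>
                have h0 := hs 0 (by omega)
                simp at h0 ⊢
                exact lt_of_lt_of_le h0 (not_lt.mp hb)
              | succ j'' =>
                have := hs (j'' + 1) (by omega)
                simpa using this

lemma min?_first {α : Type} (key : α → Int) (xs : List α) (hne : xs ≠ []) :
    ∃ (i : Nat) (h : i < xs.length), PySem.List.min? xs key = some xs[i] ∧
      ∀ (j : Nat) (hj : j < i), key xs[i] < key (xs[j]'(lt_trans hj h)) := by
  match xs with
  | x :: t =>
    obtain ⟨i, h, hf, hs⟩ := foldl_min_first key t x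
    exact ⟨i, h, by simpa [PySem.List.min?] using hf, hs⟩

-- interval bookkeeping: deleting s[i+1] merges gaps i and i+1 (A writes the merged
-- value into slot i and pops slot i+1)
lemma gaps_erase_mid : ∀ (i : Nat) (s : List Int) (h : i + 2 < s.length),
    gaps (s.eraseIdx (i + 1)) = ((gaps s).set i (s[i + 2] - s[i]'(by omega))).eraseIdx (i + 1)
  | 0, a :: b :: c :: t, _ => by simp [gaps]
  | i + 1, a :: b :: c :: t', h => by
      have ih := gaps_erase_mid i (b :: c :: t') (by simpa using h)
      simp only [List.eraseIdx_cons_succ, List.getElem_cons_succ] at ih ⊢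
      simp [gaps] at ih ⊢
      simp [ih]
  | 0, [], h => by simp at h
  | 0, [_], h => by simp at h
  | 0, [_, _], h => by simp at h
  | _ + 1, [], h => by simp at h
  | _ + 1, [_], h => by simp at h
  | _ + 1, [_, _], h => by simp at h

lemma gaps_dropLast : ∀ (s : List Int), gaps s.dropLast = (gaps s).dropLast
  | [] => rfl
  | [_] => rfl
  | [_, _] => rfl
  | a :: b :: c :: t => by
      have ih := gaps_dropLast (b :: c :: t)
      simp only [List.dropLast_cons₂, gaps] at ih ⊢
      simp [ih]

-- deleting the last element drops the last gap (A pops slot min_idx itself there)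
lemma gaps_erase_last (s : List Int) (h : 2 ≤ s.length) :
    gaps (s.eraseIdx (s.length - 1)) = (gaps s).eraseIdx (s.length - 2) := by
  have h1 : s.eraseIdx (s.length - 1) = s.dropLast := by
    rw [List.dropLast_eq_eraseIdx (i := s.length - 1) (by omega)]
  have h2 : (gaps s).eraseIdx (s.length - 2) = (gaps s).dropLast := by
    have := length_gaps s
    rw [List.dropLast_eq_eraseIdx (i := s.length - 2) (by omega)]
  rw [h1, h2, gaps_dropLast]

-- A's initial intervals comprehension is exactly `gaps`
lemma intervals_eq (s : List Int) :
    (PySem.List.pyRange 0 (PySem.List.len s - 1) 1).map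
      (fun i => PySem.List.pyGetD s (i + 1) 0 - PySem.List.pyGetD s i 0) = gaps s := by
  apply List.ext_getElem
  · simp only [List.length_map, PySem.List.length_pyRange_one, PySem.List.len_eq, length_gaps]
    omega
  · intro k h1 h2
    have hk1 : k + 1 < s.length := by
      rw [length_gaps] at h2; omega
    simp only [List.getElem_map]
    rw [PySem.List.getElem_pyRange_one]
    rw [getElem_gaps s k hk1 h2]
    have c1 : (0 : Int) + (k : Int) + 1 = ((k + 1 : Nat) : Int) := by omega
    have c2 : (0 : Int) + (k : Int) = ((k : Nat) : Int) := by omega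
    rw [c1, c2, PySem.List.pyGetD_natCast, PySem.List.pyGetD_natCast]
    rw [List.getD_eq_getElem _ _ hk1, List.getD_eq_getElem _ _ (by omega)]

-- one round of A: remove the right endpoint of the LEFTMOST minimal gap
lemma step_eq (s : List Int) (rm : List Int) (h2 : 2 ≤ s.length) :
    ∃ (i : Nat) (h : i + 1 < s.length) (hg : i < (gaps s).length),
      aTrimStep (s, gaps s, rm) = (s.eraseIdx (i + 1), gaps (s.eraseIdx (i + 1)), rm ++ [s[i + 1]]) ∧
      (∀ (q : Nat) (hq : q < (gaps s).length),
        (gaps s)[i] ≤ (gaps s)[q] ∧ (q < i → (gaps s)[i] < (gaps s)[q])) := by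
  have hgl := length_gaps s
  have hne : gaps s ≠ [] := by
    intro hE; rw [hE] at hgl; simp at hgl; omega
  obtain ⟨i, hi, hmin, hstrict⟩ := min?_first (fun x => x) (gaps s) hne
  have hle : ∀ (j : Nat) (hj : j < (gaps s).length), (gaps s)[i] ≤ (gaps s)[j] := by
    intro j hj; exact PySem.List.min?_isMin hmin _ (List.getElem_mem hj)
  have hi1 : i + 1 < s.length := by omega
  refine ⟨i, hi1, hi, ?_, fun q hq => ⟨hle q hq, fun hqi => hstrict q hqi⟩⟩
  have hidx : PySem.List.index? (gaps s) ((gaps s)[i]) = some i := by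
    show List.idxOf? ((gaps s)[i]) (gaps s) = some i
    rw [List.idxOf?_eq_some_iff]
    refine ⟨hi, rfl, fun j hj => ?_⟩
    have := hstrict j hj
    omega
  have c1 : ((i : Int) + 1) = ((i + 1 : Nat) : Int) := by omega
  have c2 : ((i : Int) + 2) = ((i + 2 : Nat) : Int) := by omega
  unfold aTrimStep
  simp only [hmin, hidx]
  rw [if_pos (by omega : 0 < (gaps s).length)]
  have hget1N : PySem.List.pyGetD s (((i + 1 : Nat)) : Int) 0 = s[i + 1] := by
    rw [PySem.List.pyGetD_natCast, List.getD_eq_getElem _ _ hi1]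
  have hget0 : PySem.List.pyGetD s ((i : Int)) 0 = s[i]'(by omega) := by
    rw [PySem.List.pyGetD_natCast, List.getD_eq_getElem _ _ (by omega)]
  by_cases hmerge : i + 1 < (gaps s).length
  · have hget2N : PySem.List.pyGetD s (((i + 2 : Nat)) : Int) 0 = s[i + 2]'(by omega) := by
      rw [PySem.List.pyGetD_natCast, List.getD_eq_getElem _ _ (by omega)]
    have hc : ((i : Int)) < PySem.List.len (gaps s) - 1 := by
      rw [PySem.List.len_eq]; omega
    rw [if_pos hc, PySem.List.pySetD_natCast, c1, c2]
    simp only [hget2N, hget0, hget1N]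
    have hLl : ((gaps s).set i (s[i + 2]'(by omega) - s[i]'(by omega))).length
        = (gaps s).length := List.length_set ..
    rw [if_pos (by rw [PySem.List.len_eq, hLl]; exact_mod_cast hmerge :
      (((i + 1 : Nat)) : Int) < PySem.List.len
        ((gaps s).set i (s[i + 2]'(by omega) - s[i]'(by omega))))]
    rw [PySem.List.pop?_natCast ((gaps s).set i (s[i + 2]'(by omega) - s[i]'(by omega)))
      (i + 1) (by rw [hLl]; omega)]
    rw [PySem.List.pop?_natCast s (i + 1) hi1]
    refine congrArg₂ Prod.mk rfl (congrArg₂ Prod.mk ?_ rfl)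
    exact (gaps_erase_mid i s (by omega)).symm
  · have hc : ¬ ((i : Int)) < PySem.List.len (gaps s) - 1 := by
      rw [PySem.List.len_eq]; omega
    rw [if_neg hc]
    rw [if_neg (by rw [PySem.List.len_eq]; omega :
      ¬ ((i : Int)) + 1 < PySem.List.len (gaps s))]
    rw [PySem.List.pop?_natCast (gaps s) i hi, c1, PySem.List.pop?_natCast s (i + 1) hi1]
    simp only [hget1N]
    refine congrArg₂ Prod.mk rfl (congrArg₂ Prod.mk ?_ rfl)
    have hieq : i = s.length - 2 := by omega
    have hieq1 : i + 1 = s.length - 1 := by omega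
    rw [hieq1, hieq, gaps_erase_last s h2]

-- the to_remove accumulator of aTrimStep is append-only and does not influence the step
lemma aTrimStep_shift (c g rm : List Int) :
    aTrimStep (c, g, rm) = ((aTrimStep (c, g, [])).1, (aTrimStep (c, g, [])).2.1,
      rm ++ (aTrimStep (c, g, [])).2.2) := by
  unfold aTrimStep
  by_cases h : 0 < g.length
  · rcases hm : PySem.List.min? g (fun x => x) with _ | m
    · simp [if_pos h, hm]
    · rcases hi : List.idxOf? m g with _ | mi
      · simp [if_pos h, hm, PySem.List.index?, hi]
      · simp [if_pos h, hm, PySem.List.index?, hi]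
  · simp [if_neg h]

lemma iterate_rm : ∀ (n : Nat) (c g rm : List Int),
    (aTrimStep^[n] (c, g, rm)).2.2 = rm ++ (aTrimStep^[n] (c, g, [])).2.2
  | 0, c, g, rm => by simp
  | n + 1, c, g, rm => by
    rw [Function.iterate_succ_apply, Function.iterate_succ_apply]
    rcases hA : aTrimStep (c, g, []) with ⟨a1, a2, a3⟩
    rw [aTrimStep_shift c g rm, hA]
    dsimp only
    rw [iterate_rm n a1 a2 (rm ++ a3), iterate_rm n a1 a2 a3]
    simp

-- ---- facts about bInsort ----
lemma mem_pyInsert {α : Type} (xs : List α) (i : Int) (v x : α) :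
    x ∈ PySem.List.insert xs i v ↔ x = v ∨ x ∈ xs := by
  unfold PySem.List.insert
  rcases PySem.List.sliceIndices xs.length (some i) none 1 with ⟨k, a, b⟩
  constructor
  · intro hx
    rcases List.mem_append.mp hx with h1 | h2
    · exact Or.inr (List.take_subset _ _ h1)
    · rcases List.mem_cons.mp h2 with h3 | h4
      · exact Or.inl h3
      · exact Or.inr (List.drop_subset _ _ h4)
  · intro hx
    rcases hx with h1 | h2
    · subst h1; exact List.mem_append.mpr (Or.inr (List.mem_cons_self))
    · rw [← List.take_append_drop k.toNat xs] at h2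
      rcases List.mem_append.mp h2 with h3 | h4
      · exact List.mem_append.mpr (Or.inl h3)
      · exact List.mem_append.mpr (Or.inr (List.mem_cons_of_mem _ h4))

lemma mem_bInsort (pending : List (Int × Int)) (entry x : Int × Int) :
    x ∈ bInsort pending entry ↔ x = entry ∨ x ∈ pending := by
  unfold bInsort; exact mem_pyInsert ..

-- order facts about the explicit pair comparison
lemma bLexLt_asymm (a b : Int × Int) (h : bLexLt a b = true) : bLexLt b a = false := by
  simp [bLexLt] at h ⊢; omega

lemma bLexLt_trans (a b c : Int × Int) (h1 : bLexLt a b = true) (h2 : bLexLt b c = true) :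
    bLexLt a c = true := by
  simp [bLexLt] at h1 h2 ⊢; omega

lemma bLexLt_trans_false (a b c : Int × Int) (h1 : bLexLt a b = false)
    (h2 : bLexLt b c = false) : bLexLt a c = false := by
  simp [bLexLt] at h1 h2 ⊢; omega

-- what the scan of bInsortPos guarantees about the found position
lemma bInsortPos_spec (pending : List (Int × Int)) (entry : Int × Int) :
    ∀ (i : Nat) (hi : i ≤ pending.length),
      bInsortPos pending entry i ≤ i ∧
      (∀ (q : Nat) (hq : q < pending.length), bInsortPos pending entry i ≤ q → q < i →
        bLexLt pending[q] entry = true) ∧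
      (0 < bInsortPos pending entry i →
        bLexLt (PySem.List.pyGetD pending ((bInsortPos pending entry i : Int) - 1) (0, 0)) entry = false)
  | 0, hi => ⟨Nat.le_refl _, by omega, by intro hpos; simp [bInsortPos] at hpos⟩
  | i + 1, hi => by
    obtain ⟨ih1, ih2, ih3⟩ := bInsortPos_spec pending entry i (by omega)
    have hget : PySem.List.pyGetD pending ((i : Nat) : Int) (0, 0) = pending[i]'(by omega) := by
      rw [PySem.List.pyGetD_natCast, List.getD_eq_getElem _ _ (by omega)]
    by_cases hc : bLexLt (PySem.List.pyGetD pending ((i : Nat) : Int) (0, 0)) entry = true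
    · have hrw0 : bInsortPos pending entry (i + 1) =
          if bLexLt (PySem.List.pyGetD pending ((i : Nat) : Int) (0, 0)) entry = true then
            bInsortPos pending entry i else i + 1 := rfl
      have hrw : bInsortPos pending entry (i + 1) = bInsortPos pending entry i := by
        rw [hrw0, if_pos hc]
      rw [hrw]
      refine ⟨by omega, ?_, ih3⟩
      intro q hq hle hlt
      by_cases hqi : q < i
      · exact ih2 q hq hle hqi
      · have : q = i := by omega
        subst this
        rw [hget] at hc
        exact hc
    · have hrw0 : bInsortPos pending entry (i + 1) =
          if bLexLt (PySem.List.pyGetD pending ((i : Nat) : Int) (0, 0)) entry = true then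
            bInsortPos pending entry i else i + 1 := rfl
      have hrw : bInsortPos pending entry (i + 1) = i + 1 := by
        rw [hrw0, if_neg hc]
      rw [hrw]
      refine ⟨Nat.le_refl _, by omega, ?_⟩
      intro hpos
      have hcast : (((i + 1 : Nat)) : Int) - 1 = ((i : Nat) : Int) := by push_cast; ring
      rw [hcast]
      simpa using hc

lemma bInsort_eq (pending : List (Int × Int)) (entry : Int × Int) :
    bInsort pending entry = List.take (bInsortPos pending entry pending.length) pending
      ++ entry :: List.drop (bInsortPos pending entry pending.length) pending := by
  unfold bInsort
  exact PySem.List.insert_natCast pending _ entry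
    (bInsortPos_spec pending entry pending.length (Nat.le_refl _)).1

lemma bInsort_pairwise (pending : List (Int × Int)) (entry : Int × Int)
    (h : List.Pairwise (fun a b => bLexLt a b = false) pending) :
    List.Pairwise (fun a b => bLexLt a b = false) (bInsort pending entry) := by
  obtain ⟨hle, hafter, hbefore⟩ := bInsortPos_spec pending entry pending.length (Nat.le_refl _)
  set pos := bInsortPos pending entry pending.length with hpos
  rw [bInsort_eq]
  rw [List.pairwise_append]
  refine ⟨List.Pairwise.sublist (List.take_sublist _ _) h, ?_, ?_⟩
  · rw [List.pairwise_cons]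
    refine ⟨?_, List.Pairwise.sublist (List.drop_sublist _ _) h⟩
    intro y hy
    obtain ⟨q, hq, hqy⟩ := List.mem_iff_getElem.mp hy
    rw [List.getElem_drop] at hqy
    rw [List.length_drop] at hq
    have hlen : pos + q < pending.length := by omega
    have := hafter (pos + q) hlen (by omega) (by omega)
    rw [hqy] at this
    exact bLexLt_asymm _ _ this
  · intro x hx y hy
    obtain ⟨q', hq', hq'x⟩ := List.mem_iff_getElem.mp hx
    rw [List.getElem_take] at hq'x
    rw [List.length_take] at hq'
    have hq'len : q' < pending.length := by omega
    have hq'pos : q' < pos := by omega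
    have hxlast : bLexLt (pending[q']'hq'len) entry = false := by
      have h1 : bLexLt (pending[pos - 1]'(by omega)) entry = false := by
        have hb := hbefore (by omega)
        rwa [show ((pos : Int) - 1) = ((pos - 1 : Nat) : Int) by omega,
          PySem.List.pyGetD_natCast, List.getD_eq_getElem _ _ (by omega)] at hb
      by_cases he : q' = pos - 1
      · subst he; exact h1
      · have hlt : q' < pos - 1 := by omega
        have hp := List.pairwise_iff_getElem.mp h q' (pos - 1) hq'len (by omega) hlt
        exact bLexLt_trans_false _ _ _ hp h1
    rcases List.mem_cons.mp hy with h1 | h2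
    · subst h1; rw [← hq'x]; exact hxlast
    · obtain ⟨q, hq, hqy⟩ := List.mem_iff_getElem.mp h2
      rw [List.getElem_drop] at hqy
      rw [List.length_drop] at hq
      have hlen : pos + q < pending.length := by omega
      have hp := List.pairwise_iff_getElem.mp h q' (pos + q) hq'len hlen (by omega)
      rw [hq'x, hqy] at hp
      exact hp

-- ---- Dict.erase lookup ----
lemma get?_erase {ν : Type} (d : PySem.Dict Int ν) (k k' : Int) :
    (d.erase k).get? k' = if k' = k then none else d.get? k' := by
  rcases d with ⟨items⟩
  simp only [PySem.Dict.erase, PySem.Dict.get?]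
  induction items with
  | nil => simp
  | cons p t ih =>
    rw [List.filter_cons]
    by_cases hpk : p.1 = k
    · rw [if_neg (by simp [hpk])]
      rw [ih]
      by_cases hk : k' = k
      · simp [hk]
      · rw [if_neg hk, if_neg hk]
        rw [List.find?_cons_of_neg (by simp [hpk]; exact fun h => hk h.symm)]
    · rw [if_pos (by simp [hpk])]
      by_cases hpk' : p.1 = k'
      · have hk : ¬ k' = k := fun he => hpk (by rw [hpk', he])
        rw [if_neg hk]
        rw [List.find?_cons_of_pos (by simp [hpk']), List.find?_cons_of_pos (by simp [hpk'])]
      · rw [List.find?_cons_of_neg (by simp [hpk']), List.find?_cons_of_neg (by simp [hpk'])]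
        exact ih

-- ---- the simulation ----

lemma mem_dropLast_of_ne {α : Type} {l : List α} (h : l ≠ []) {x : α}
    (hx : x ∈ l) (hne : x ≠ l.getLast h) : x ∈ l.dropLast := by
  conv at hx => rw [← List.dropLast_append_getLast h]
  rcases List.mem_append.mp hx with h1 | h2
  · exact h1
  · simp at h2; exact absurd h2 hne

lemma getLast_min {l : List (Int × Int)} (h : l ≠ [])
    (hs : List.Pairwise (fun a b => bLexLt a b = false) l) {x : Int × Int} (hx : x ∈ l) :
    x = l.getLast h ∨ bLexLt x (l.getLast h) = false := by
  conv at hx => rw [← List.dropLast_append_getLast h]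
  rcases List.mem_append.mp hx with h1 | h2
  · right
    have hs' := hs
    rw [← List.dropLast_append_getLast h, List.pairwise_append] at hs'
    exact hs'.2.2 x h1 _ (by simp)
  · left; simpa using h2

lemma map_eraseIdx {α β : Type} (f : α → β) :
    ∀ (l : List α) (n : Nat), (l.eraseIdx n).map f = (l.map f).eraseIdx n
  | [], _ => by simp
  | a :: t, 0 => by simp
  | a :: t, n + 1 => by simp [map_eraseIdx f t n]

-- getD through eraseIdx, on either side of the erased slot
lemma getD_eraseIdx_lt (l : List Nat) (i j : Nat) (hj : j < (l.eraseIdx i).length)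
    (hji : j < i) : (l.eraseIdx i).getD j 0 = l.getD j 0 := by
  have hl : j < l.length := by
    have := List.length_eraseIdx (l := l) (i := i); split at this <;> omega
  rw [List.getD_eq_getElem _ _ hj, List.getD_eq_getElem _ _ hl, List.getElem_eraseIdx, dif_pos hji]

lemma getD_eraseIdx_ge (l : List Nat) (i j : Nat) (hj : j < (l.eraseIdx i).length)
    (hji : i ≤ j) : (l.eraseIdx i).getD j 0 = l.getD (j + 1) 0 := by
  have hl : j + 1 < l.length := by
    have := List.length_eraseIdx (l := l) (i := i); split at this <;> omega
  rw [List.getD_eq_getElem _ _ hj, List.getD_eq_getElem _ _ hl, List.getElem_eraseIdx,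
    dif_neg (by omega)]

-- strictly increasing alive positions: getD is strictly monotone
lemma idxs_getD_lt (idxs : List Nat) (Hmono : List.Pairwise (· < ·) idxs)
    (q r : Nat) (hqr : q < r) (hr : r < idxs.length) :
    idxs.getD q 0 < idxs.getD r 0 := by
  rw [List.getD_eq_getElem _ _ (by omega), List.getD_eq_getElem _ _ hr]
  exact List.pairwise_iff_getElem.mp Hmono q r (by omega) hr hqr

lemma idxs_getD_inj (idxs : List Nat) (Hmono : List.Pairwise (· < ·) idxs)
    (q r : Nat) (hq : q < idxs.length) (hr : r < idxs.length)
    (he : idxs.getD q 0 = idxs.getD r 0) : q = r := by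
  rcases Nat.lt_trichotomy q r with hlt | heq | hgt
  · have := idxs_getD_lt idxs Hmono q r hlt hr; omega
  · exact heq
  · have := idxs_getD_lt idxs Hmono r q hgt hq; omega

-- the accepted pop performs exactly A's step: it deletes the right endpoint of the
-- LEFTMOST minimal gap of the current schedule
lemma accept_step (s0 : List Int) (idxs : List Nat) (pending : List (Int × Int))
    (h2 : pending ≠ [])
    (Hmono : List.Pairwise (· < ·) idxs)
    (Hsorted : List.Pairwise (fun a b => bLexLt a b = false) pending)
    (Hkeys : ∀ (p : Nat), p + 1 < idxs.length →
      ((s0.getD (idxs.getD (p+1) 0) 0 - s0.getD (idxs.getD p 0) 0,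
        ((idxs.getD p 0 : Nat) : Int)) ∈ pending))
    (p : Nat) (hp : p + 1 < idxs.length)
    (he : pending.getLast h2 = (s0.getD (idxs.getD (p+1) 0) 0 - s0.getD (idxs.getD p 0) 0,
      ((idxs.getD p 0 : Nat) : Int))) :
    aTrimStep (idxs.map (fun i => s0.getD i 0), gaps (idxs.map (fun i => s0.getD i 0)),
        ([] : List Int))
      = ((idxs.eraseIdx (p+1)).map (fun i => s0.getD i 0),
         gaps ((idxs.eraseIdx (p+1)).map (fun i => s0.getD i 0)),
         [s0.getD (idxs.getD (p+1) 0) 0]) := by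
  set C := idxs.map (fun i => s0.getD i 0) with hCdef
  have hCL : C.length = idxs.length := List.length_map ..
  have hgL : (gaps C).length = idxs.length - 1 := by rw [length_gaps, hCL]
  have hkey : ∀ (q : Nat) (hq : q + 1 < idxs.length),
      (gaps C)[q]'(by omega) = s0.getD (idxs.getD (q+1) 0) 0 - s0.getD (idxs.getD q 0) 0 := by
    intro q hq
    rw [getElem_gaps C q (by omega) (by omega)]
    simp only [hCdef, List.getElem_map]
    rw [List.getD_eq_getElem idxs 0 hq, List.getD_eq_getElem idxs 0 (show q < idxs.length by omega)]
  -- the popped entry is lexicographically minimal among all current keys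
  have hminP : ∀ (q : Nat) (hq : q + 1 < idxs.length),
      ((gaps C)[p]'(by omega) ≤ (gaps C)[q]'(by omega)) ∧
      (q < p → (gaps C)[p]'(by omega) < (gaps C)[q]'(by omega)) := by
    intro q hq
    rcases getLast_min h2 Hsorted (Hkeys q hq) with hEq | hLt
    · rw [he] at hEq
      have h1 : idxs.getD q 0 = idxs.getD p 0 := by
        have := congrArg Prod.snd hEq
        simpa using this
      have hqp : q = p := idxs_getD_inj idxs Hmono q p (by omega) (by omega) h1
      subst hqp
      exact ⟨le_refl _, by omega⟩
    · rw [he] at hLt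
      simp only [bLexLt, decide_eq_false_iff_not, not_or, not_and, not_lt] at hLt
      rw [hkey q hq, hkey p hp]
      constructor
      · omega
      · intro hqp
        have hne : idxs.getD q 0 ≠ idxs.getD p 0 := by
          have := idxs_getD_lt idxs Hmono q p hqp (by omega); omega
        rcases lt_or_eq_of_le hLt.1 with hlt | heq
        · omega
        · exfalso
          have := hLt.2 heq.symm
          have h2' : (idxs.getD p 0 : Int) ≤ (idxs.getD q 0 : Int) := this
          have := idxs_getD_lt idxs Hmono q p hqp (by omega)
          omega
  obtain ⟨i, hi, hig, hstep, hchar⟩ := step_eq C [] (by omega)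
  have hip : i = p := by
    rcases Nat.lt_trichotomy i p with hlt | heq | hgt
    · have h1 := (hminP i (by omega)).2 hlt
      have h2' := (hchar p (by omega)).1
      omega
    · exact heq
    · have h1 := (hchar p (by omega)).2 hgt
      have h2' := (hminP i (by omega)).1
      omega
  subst hip
  have h1 : C.eraseIdx (i+1) = (idxs.eraseIdx (i+1)).map (fun i => s0.getD i 0) := by
    rw [hCdef, map_eraseIdx]
  have hv : C[i + 1]'(by omega) = s0.getD (idxs.getD (i+1) 0) 0 := by
    simp only [hCdef, List.getElem_map]
    rw [List.getD_eq_getElem idxs 0 hp]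
  rw [hstep, h1]
  exact congrArg₂ Prod.mk rfl (congrArg₂ Prod.mk rfl (by rw [hv]; simp))

lemma bLoop_sim (s0 : List Int) :
    ∀ (k : Nat) (pending : List (Int × Int)) (nxt : PySem.Dict Int Int) (removed : List Int)
      (idxs : List Nat),
      List.Pairwise (· < ·) idxs →
      (∀ (x y : Int), nxt.get? x = some y ↔
        ∃ (p : Nat), p + 1 < idxs.length ∧ x = ((idxs.getD p 0 : Nat) : Int) ∧
          y = ((idxs.getD (p+1) 0 : Nat) : Int)) →
      List.Pairwise (fun a b => bLexLt a b = false) pending →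
      (∀ (p : Nat), p + 1 < idxs.length →
        ((s0.getD (idxs.getD (p+1) 0) 0 - s0.getD (idxs.getD p 0) 0,
          ((idxs.getD p 0 : Nat) : Int)) ∈ pending)) →
      ∀ y : Int, y ∈ bLoop s0 k pending nxt removed ↔
        (y ∈ removed ∨ y ∈ (aTrimStep^[k] (idxs.map (fun i => s0.getD i 0),
          gaps (idxs.map (fun i => s0.getD i 0)), [])).2.2) := by
  intro k pending nxt removed
  induction k, pending, nxt, removed using bLoop.induct (s := s0) with
  | case1 k pending nxt removed h e rest hnone ih =>
    intro idxs Hmono Hnxt Hsorted Hkeys y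
    have hEe : e = pending.getLast h.2 := rfl
    have hRr : rest = pending.dropLast := rfl
    rw [hEe] at hnone
    rw [hRr] at ih
    unfold bLoop
    rw [dif_pos h]
    simp only [hnone]
    apply ih idxs Hmono Hnxt (List.Pairwise.sublist (List.dropLast_sublist _) Hsorted)
    intro p hp
    refine mem_dropLast_of_ne h.2 (Hkeys p hp) ?_
    intro hE
    have hsome : nxt.get? (pending.getLast h.2).2 =
        some ((idxs.getD (p+1) 0 : Nat) : Int) := by
      rw [(Hnxt _ _)]
      exact ⟨p, hp, by rw [← hE], rfl⟩
    rw [hnone] at hsome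
    simp at hsome
  | case2 k pending nxt removed h e rest m hm hne ih =>
    intro idxs Hmono Hnxt Hsorted Hkeys y
    have hEe : e = pending.getLast h.2 := rfl
    have hRr : rest = pending.dropLast := rfl
    rw [hEe] at hm hne
    rw [hRr] at ih
    unfold bLoop
    rw [dif_pos h]
    simp only [hm, if_pos hne]
    apply ih idxs Hmono Hnxt (List.Pairwise.sublist (List.dropLast_sublist _) Hsorted)
    intro p hp
    refine mem_dropLast_of_ne h.2 (Hkeys p hp) ?_
    intro hE
    obtain ⟨q, hq, hq1, hq2⟩ := (Hnxt _ _).mp hm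
    have hqp : q = p := by
      have h1 : ((idxs.getD q 0 : Nat) : Int) = ((idxs.getD p 0 : Nat) : Int) := by
        rw [← hq1, ← hE]
      exact idxs_getD_inj idxs Hmono q p (by omega) (by omega) (by exact_mod_cast h1)
    subst hqp
    apply hne
    rw [hq2, hq1]
    simp only [PySem.List.pyGetD_natCast]
    rw [← hE]
  | case3 k pending nxt removed h e rest m hm hne removed' hnone2 ih =>
    intro idxs Hmono Hnxt Hsorted Hkeys y
    have hEe : e = pending.getLast h.2 := rfl
    have hRr : rest = pending.dropLast := rfl
    have hRm : removed' = removed ++ [PySem.List.pyGetD s0 m 0] := rfl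
    rw [hEe] at hm hne
    rw [hRr, hRm] at ih
    obtain ⟨p, hp, he2, hmv⟩ := (Hnxt _ _).mp hm
    have hgap := not_ne_iff.mp hne
    have heq : pending.getLast h.2 =
        (s0.getD (idxs.getD (p+1) 0) 0 - s0.getD (idxs.getD p 0) 0,
          ((idxs.getD p 0 : Nat) : Int)) := by
      rw [Prod.ext_iff]
      refine ⟨?_, he2⟩
      rw [← hgap, hmv, he2]
      simp only [PySem.List.pyGetD_natCast]
    -- p + 1 is the last alive position
    have hlast : p + 2 = idxs.length := by
      by_contra hc
      have hsome : nxt.get? m = some ((idxs.getD (p+2) 0 : Nat) : Int) := by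
        rw [(Hnxt _ _)]
        exact ⟨p + 1, by omega, hmv, rfl⟩
      rw [hnone2] at hsome
      simp at hsome
    have hL' : (idxs.eraseIdx (p+1)).length = p + 1 := by
      rw [List.length_eraseIdx]; split <;> omega
    have Hmono' := List.Pairwise.sublist (List.eraseIdx_sublist idxs (p+1)) Hmono
    have Hnxt' : ∀ (x y' : Int), ((nxt.erase m).erase (pending.getLast h.2).2).get? x = some y' ↔
        ∃ (q : Nat), q + 1 < (idxs.eraseIdx (p+1)).length ∧
          x = (((idxs.eraseIdx (p+1)).getD q 0 : Nat) : Int) ∧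
          y' = (((idxs.eraseIdx (p+1)).getD (q+1) 0 : Nat) : Int) := by
      intro x y'
      rw [get?_erase, get?_erase]
      constructor
      · intro hx
        split_ifs at hx with hxe hxm
        obtain ⟨q, hq, hx1, hy1⟩ := (Hnxt _ _).mp hx
        have hqne : q ≠ p := by
          intro hE; subst hE
          rw [he2] at hxe
          exact hxe hx1
        have hqne1 : q ≠ p + 1 := by
          intro hE; subst hE
          rw [hmv] at hxm
          exact hxm hx1
        have hqlt : q < p := by omega
        refine ⟨q, by omega, ?_, ?_⟩
        · rw [getD_eraseIdx_lt idxs (p+1) q (by omega) (by omega)]; exact hx1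
        · rw [getD_eraseIdx_lt idxs (p+1) (q+1) (by omega) (by omega)]; exact hy1
      · rintro ⟨q, hq, hx1, hy1⟩
        have hqlt : q < p := by omega
        rw [getD_eraseIdx_lt idxs (p+1) q (by omega) (by omega)] at hx1
        rw [getD_eraseIdx_lt idxs (p+1) (q+1) (by omega) (by omega)] at hy1
        have hxe : x ≠ (pending.getLast h.2).2 := by
          rw [he2, hx1]
          have := idxs_getD_lt idxs Hmono q p hqlt (by omega)
          intro hE
          have : idxs.getD q 0 = idxs.getD p 0 := by exact_mod_cast hE
          omega
        have hxm : x ≠ m := by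
          rw [hmv, hx1]
          have := idxs_getD_lt idxs Hmono q (p+1) (by omega) (by omega)
          intro hE
          have : idxs.getD q 0 = idxs.getD (p+1) 0 := by exact_mod_cast hE
          omega
        rw [if_neg hxe, if_neg hxm, (Hnxt _ _)]
        exact ⟨q, by omega, hx1, hy1⟩
    have Hsorted' := List.Pairwise.sublist (List.dropLast_sublist _) Hsorted
    have Hkeys' : ∀ (q : Nat), q + 1 < (idxs.eraseIdx (p+1)).length →
        ((s0.getD ((idxs.eraseIdx (p+1)).getD (q+1) 0) 0
            - s0.getD ((idxs.eraseIdx (p+1)).getD q 0) 0,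
          (((idxs.eraseIdx (p+1)).getD q 0 : Nat) : Int)) ∈ pending.dropLast) := by
      intro q hq
      have hqlt : q < p := by omega
      rw [getD_eraseIdx_lt idxs (p+1) q (by omega) (by omega),
        getD_eraseIdx_lt idxs (p+1) (q+1) (by omega) (by omega)]
      refine mem_dropLast_of_ne h.2 (Hkeys q (by omega)) ?_
      rw [heq]
      intro hE
      have h1 : idxs.getD q 0 = idxs.getD p 0 := by
        have := congrArg Prod.snd hE
        simpa using this
      have := idxs_getD_lt idxs Hmono q p hqlt (by omega)
      omega
    have hstep := accept_step s0 idxs pending h.2 Hmono Hsorted Hkeys p hp heq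
    unfold bLoop
    rw [dif_pos h]
    simp only [hm, if_neg (by exact hne), hnone2]
    rw [ih (idxs.eraseIdx (p+1)) Hmono' Hnxt' Hsorted' Hkeys' y]
    have hvv : PySem.List.pyGetD s0 m 0 = s0.getD (idxs.getD (p+1) 0) 0 := by
      rw [hmv]; simp only [PySem.List.pyGetD_natCast]
    have hit : (aTrimStep^[k] (idxs.map (fun i => s0.getD i 0),
        gaps (idxs.map (fun i => s0.getD i 0)), ([] : List Int))).2.2
        = [s0.getD (idxs.getD (p+1) 0) 0] ++
          (aTrimStep^[k-1] ((idxs.eraseIdx (p+1)).map (fun i => s0.getD i 0),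
            gaps ((idxs.eraseIdx (p+1)).map (fun i => s0.getD i 0)), [])).2.2 := by
      conv_lhs => rw [show k = (k-1) + 1 by omega]
      rw [Function.iterate_succ_apply, hstep, iterate_rm]
    rw [hit, hvv]
    simp only [List.mem_append, List.mem_singleton]
    tauto
  | case4 k pending nxt removed h e rest m hm hne removed' m1 hm1 ih =>
    intro idxs Hmono Hnxt Hsorted Hkeys y
    have hEe : e = pending.getLast h.2 := rfl
    have hRr : rest = pending.dropLast := rfl
    have hRm : removed' = removed ++ [PySem.List.pyGetD s0 m 0] := rfl
    rw [hEe] at hm hne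
    rw [hRr, hRm] at ih
    obtain ⟨p, hp, he2, hmv⟩ := (Hnxt _ _).mp hm
    have hgap := not_ne_iff.mp hne
    have heq : pending.getLast h.2 =
        (s0.getD (idxs.getD (p+1) 0) 0 - s0.getD (idxs.getD p 0) 0,
          ((idxs.getD p 0 : Nat) : Int)) := by
      rw [Prod.ext_iff]
      refine ⟨?_, he2⟩
      rw [← hgap, hmv, he2]
      simp only [PySem.List.pyGetD_natCast]
    -- the successor of the deleted element: m1 = idxs[p+2]
    obtain ⟨q2, hq2, hx2, hy2⟩ := (Hnxt _ _).mp hm1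
    have hq2p : q2 = p + 1 := by
      have h1 : idxs.getD q2 0 = idxs.getD (p+1) 0 := by
        rw [hmv] at hx2
        exact_mod_cast hx2.symm
      exact idxs_getD_inj idxs Hmono q2 (p+1) (by omega) (by omega) h1
    subst hq2p
    have hp2 : p + 2 < idxs.length := by omega
    have hL' : (idxs.eraseIdx (p+1)).length = idxs.length - 1 := by
      rw [List.length_eraseIdx]; split <;> omega
    have Hmono' := List.Pairwise.sublist (List.eraseIdx_sublist idxs (p+1)) Hmono
    have hgetlt : ∀ (q : Nat), q < p + 1 → q < (idxs.eraseIdx (p+1)).length →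
        (idxs.eraseIdx (p+1)).getD q 0 = idxs.getD q 0 := by
      intro q hq1 hq2'
      exact getD_eraseIdx_lt idxs (p+1) q hq2' hq1
    have hgetge : ∀ (q : Nat), p + 1 ≤ q → q < (idxs.eraseIdx (p+1)).length →
        (idxs.eraseIdx (p+1)).getD q 0 = idxs.getD (q+1) 0 := by
      intro q hq1 hq2'
      exact getD_eraseIdx_ge idxs (p+1) q hq2' hq1
    have Hnxt' : ∀ (x y' : Int),
        (((nxt.erase m).insert (pending.getLast h.2).2 m1)).get? x = some y' ↔
        ∃ (q : Nat), q + 1 < (idxs.eraseIdx (p+1)).length ∧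
          x = (((idxs.eraseIdx (p+1)).getD q 0 : Nat) : Int) ∧
          y' = (((idxs.eraseIdx (p+1)).getD (q+1) 0 : Nat) : Int) := by
      intro x y'
      rw [PySem.Dict.get?_insert, get?_erase]
      constructor
      · intro hx
        split_ifs at hx with hxe hxm
        · -- x is the left endpoint of the merged gap
          refine ⟨p, by omega, ?_, ?_⟩
          · rw [hgetlt p (by omega) (by omega), hxe, he2]
          · rw [hgetge (p+1) (by omega) (by omega)]
            rw [← hy2]
            exact (Option.some_injective _ hx).symm ▸ rfl
        · obtain ⟨q, hq, hx1, hy1⟩ := (Hnxt _ _).mp hx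
          have hqne : q ≠ p := by
            intro hE; subst hE
            rw [he2] at hxe
            exact hxe hx1
          have hqne1 : q ≠ p + 1 := by
            intro hE; subst hE
            rw [hmv] at hxm
            exact hxm hx1
          rcases Nat.lt_or_ge q p with hqlt | hqge
          · refine ⟨q, by omega, ?_, ?_⟩
            · rw [hgetlt q (by omega) (by omega)]; exact hx1
            · rw [hgetlt (q+1) (by omega) (by omega)]; exact hy1
          · have hqgt : p + 2 ≤ q := by omega
            refine ⟨q - 1, by omega, ?_, ?_⟩
            · rw [hgetge (q-1) (by omega) (by omega), show q - 1 + 1 = q by omega]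
              exact hx1
            · rw [hgetge (q-1+1) (by omega) (by omega), show q - 1 + 1 = q by omega]
              exact hy1
      · rintro ⟨q, hq, hx1, hy1⟩
        rcases Nat.lt_trichotomy q p with hqlt | hqe | hqgt
        · rw [hgetlt q (by omega) (by omega)] at hx1
          rw [hgetlt (q+1) (by omega) (by omega)] at hy1
          have hxe : ¬ x = (pending.getLast h.2).2 := by
            rw [he2, hx1]
            have := idxs_getD_lt idxs Hmono q p hqlt (by omega)
            intro hE
            have : idxs.getD q 0 = idxs.getD p 0 := by exact_mod_cast hE
            omega
          have hxm : ¬ x = m := by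
            rw [hmv, hx1]
            have := idxs_getD_lt idxs Hmono q (p+1) (by omega) (by omega)
            intro hE
            have : idxs.getD q 0 = idxs.getD (p+1) 0 := by exact_mod_cast hE
            omega
          rw [if_neg hxe, if_neg hxm, (Hnxt _ _)]
          exact ⟨q, by omega, hx1, hy1⟩
        · subst hqe
          rw [hgetlt q (by omega) (by omega)] at hx1
          rw [hgetge (q+1) (by omega) (by omega)] at hy1
          rw [if_pos (by rw [he2, hx1])]
          rw [hy2, hy1]
        · rw [hgetge q (by omega) (by omega)] at hx1
          rw [hgetge (q+1) (by omega) (by omega)] at hy1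
          have hxe : ¬ x = (pending.getLast h.2).2 := by
            rw [he2, hx1]
            have := idxs_getD_lt idxs Hmono p (q+1) (by omega) (by omega)
            intro hE
            have : idxs.getD (q+1) 0 = idxs.getD p 0 := by exact_mod_cast hE
            omega
          have hxm : ¬ x = m := by
            rw [hmv, hx1]
            have := idxs_getD_lt idxs Hmono (p+1) (q+1) (by omega) (by omega)
            intro hE
            have : idxs.getD (q+1) 0 = idxs.getD (p+1) 0 := by exact_mod_cast hE
            omega
          rw [if_neg hxe, if_neg hxm, (Hnxt _ _)]
          exact ⟨q + 1, by omega, hx1, by rw [show q + 1 + 1 = q + 2 by omega] at hy1; exact hy1⟩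
    have Hsorted' : List.Pairwise (fun a b => bLexLt a b = false)
        (bInsort pending.dropLast
          (PySem.List.pyGetD s0 m1 0 - PySem.List.pyGetD s0 (pending.getLast h.2).2 0,
            (pending.getLast h.2).2)) :=
      bInsort_pairwise _ _ (List.Pairwise.sublist (List.dropLast_sublist _) Hsorted)
    have hins : (PySem.List.pyGetD s0 m1 0 - PySem.List.pyGetD s0 (pending.getLast h.2).2 0,
        (pending.getLast h.2).2)
        = (s0.getD (idxs.getD (p+2) 0) 0 - s0.getD (idxs.getD p 0) 0,
          ((idxs.getD p 0 : Nat) : Int)) := by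
      rw [Prod.ext_iff]
      refine ⟨?_, he2⟩
      rw [hy2, he2]
      simp only [PySem.List.pyGetD_natCast]
    have Hkeys' : ∀ (q : Nat), q + 1 < (idxs.eraseIdx (p+1)).length →
        ((s0.getD ((idxs.eraseIdx (p+1)).getD (q+1) 0) 0
            - s0.getD ((idxs.eraseIdx (p+1)).getD q 0) 0,
          (((idxs.eraseIdx (p+1)).getD q 0 : Nat) : Int)) ∈
          bInsort pending.dropLast
            (PySem.List.pyGetD s0 m1 0 - PySem.List.pyGetD s0 (pending.getLast h.2).2 0,
              (pending.getLast h.2).2)) := by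
      intro q hq
      rw [mem_bInsort]
      rcases Nat.lt_trichotomy q p with hqlt | hqe | hqgt
      · right
        rw [hgetlt q (by omega) (by omega), hgetlt (q+1) (by omega) (by omega)]
        refine mem_dropLast_of_ne h.2 (Hkeys q (by omega)) ?_
        rw [heq]
        intro hE
        have h1 : idxs.getD q 0 = idxs.getD p 0 := by
          have := congrArg Prod.snd hE
          simpa using this
        have := idxs_getD_lt idxs Hmono q p hqlt (by omega)
        omega
      · left
        subst hqe
        rw [hgetlt q (by omega) (by omega), hgetge (q+1) (by omega) (by omega), hins]
      · right
        rw [hgetge q (by omega) (by omega), hgetge (q+1) (by omega) (by omega)]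
        rw [show q + 1 + 1 = q + 2 by omega]
        refine mem_dropLast_of_ne h.2 (Hkeys (q+1) (by omega)) ?_
        rw [heq]
        intro hE
        have h1 : idxs.getD (q+1) 0 = idxs.getD p 0 := by
          have := congrArg Prod.snd hE
          simpa using this
        have := idxs_getD_lt idxs Hmono p (q+1) (by omega) (by omega)
        omega
    have hstep := accept_step s0 idxs pending h.2 Hmono Hsorted Hkeys p hp heq
    unfold bLoop
    rw [dif_pos h]
    simp only [hm, if_neg (by exact hne), hm1]
    rw [ih (idxs.eraseIdx (p+1)) Hmono' Hnxt' Hsorted' Hkeys' y]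
    have hvv : PySem.List.pyGetD s0 m 0 = s0.getD (idxs.getD (p+1) 0) 0 := by
      rw [hmv]; simp only [PySem.List.pyGetD_natCast]
    have hit : (aTrimStep^[k] (idxs.map (fun i => s0.getD i 0),
        gaps (idxs.map (fun i => s0.getD i 0)), ([] : List Int))).2.2
        = [s0.getD (idxs.getD (p+1) 0) 0] ++
          (aTrimStep^[k-1] ((idxs.eraseIdx (p+1)).map (fun i => s0.getD i 0),
            gaps ((idxs.eraseIdx (p+1)).map (fun i => s0.getD i 0)), [])).2.2 := by
      conv_lhs => rw [show k = (k-1) + 1 by omega]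
      rw [Function.iterate_succ_apply, hstep, iterate_rm]
    rw [hit, hvv]
    simp only [List.mem_append, List.mem_singleton]
    tauto
  | case5 k pending nxt removed h =>
    intro idxs Hmono Hnxt Hsorted Hkeys y
    unfold bLoop
    rw [dif_neg h]
    rcases Decidable.not_and_iff_not_or_not.mp h with hk | hpend
    · have hk0 : k = 0 := by omega
      subst hk0
      simp
    · have hpe : pending = [] := by
        by_contra hc; exact hpend hc
      have hL : idxs.length ≤ 1 := by
        by_contra hc
        have := Hkeys 0 (by omega)
        rw [hpe] at this
        simp at this
      have hgnil : gaps (idxs.map (fun i => s0.getD i 0)) = [] := by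
        apply gaps_eq_nil
        simp
        omega
      have hfix : aTrimStep (idxs.map (fun i => s0.getD i 0),
          gaps (idxs.map (fun i => s0.getD i 0)), ([] : List Int)) =
          (idxs.map (fun i => s0.getD i 0), gaps (idxs.map (fun i => s0.getD i 0)), []) := by
        unfold aTrimStep
        rw [if_neg (by rw [hgnil]; simp)]
      rw [Function.iterate_fixed hfix]
      simp

-- ---- initial invariants ----

lemma get?_rangeFold (m : Nat) (x y : Int) :
    (((PySem.List.pyRange 0 (m : Int) 1).foldl (fun d i => d.insert i (i + 1))
      PySem.Dict.empty)).get? x = some y ↔ (0 ≤ x ∧ x < m ∧ y = x + 1) := by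
  induction m with
  | zero =>
    simp only [Nat.cast_zero, PySem.List.pyRange, PySem.Dict.get?, PySem.Dict.empty]
    simp
    omega
  | succ m ih =>
    rw [show ((m + 1 : Nat) : Int) = (m : Int) + 1 by push_cast; ring]
    rw [PySem.List.pyRange_one_succ_right (by positivity), List.foldl_append]
    simp only [List.foldl_cons, List.foldl_nil]
    rw [PySem.Dict.get?_insert]
    by_cases hx : x = (m : Int)
    · subst hx
      constructor
      · intro hE
        have h2 := Option.some_injective _ (by simpa using hE)
        refine ⟨by positivity, by omega, h2.symm⟩
      · rintro ⟨_, _, hE⟩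
        subst hE
        simp
    · rw [if_neg hx, ih]
      omega

lemma range_map_getD (l : List Int) :
    (List.range l.length).map (fun i => l.getD i 0) = l := by
  apply List.ext_getElem
  · simp
  · intro k h1 h2
    simp only [List.getElem_map, List.getElem_range]
    rw [List.getD_eq_getElem _ _ h2]

-- sorted(..., reverse=True) on int pairs is decreasing for the explicit lexicographic order
lemma sorted2_desc_pairwise (xs : List (Int × Int)) :
    List.Pairwise (fun a b => bLexLt a b = false)
      (PySem.List.sorted2 xs (fun e => e.1) (fun e => e.2) true) := by
  have hlt : ∀ (u v : Int × Int),
      (decide (u.1 < v.1) || (!decide (v.1 < u.1) && decide (u.2 < v.2))) = bLexLt u v := by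
    intro u v
    by_cases h1 : u.1 < v.1 <;> by_cases h2 : v.1 < u.1 <;> by_cases h3 : u.2 < v.2 <;>
      simp [bLexLt, h1, h2, h3] <;> omega
  show List.Pairwise (fun a b => bLexLt a b = false)
    (xs.foldl (fun acc x => PySem.List.insertBy
      (fun a b => (decide (b.1 < a.1) || (!decide (a.1 < b.1) && decide (b.2 < a.2)))) x acc) [])
  have hins : ∀ (x : Int × Int) (l : List (Int × Int)),
      List.Pairwise (fun a b => bLexLt a b = false) l →
      List.Pairwise (fun a b => bLexLt a b = false)
        (PySem.List.insertBy
          (fun a b => (decide (b.1 < a.1) || (!decide (a.1 < b.1) && decide (b.2 < a.2)))) x l) := by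
    intro x l hl
    induction l with
    | nil => simp [PySem.List.insertBy]
    | cons z zs ihz =>
      rw [show PySem.List.insertBy
          (fun a b => (decide (b.1 < a.1) || (!decide (a.1 < b.1) && decide (b.2 < a.2)))) x (z :: zs)
          = if (decide (z.1 < x.1) || (!decide (x.1 < z.1) && decide (z.2 < x.2))) = true then
              x :: z :: zs
            else z :: PySem.List.insertBy
              (fun a b => (decide (b.1 < a.1) || (!decide (a.1 < b.1) && decide (b.2 < a.2)))) x zs
          from rfl]
      rw [hlt z x]
      by_cases hc : bLexLt z x = true
      · rw [if_pos hc]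
        rw [List.pairwise_cons]
        refine ⟨?_, hl⟩
        intro w hw
        rcases List.mem_cons.mp hw with hwz | hwzs
        · subst hwz; exact bLexLt_asymm _ _ hc
        · have hzw : bLexLt z w = false := (List.pairwise_cons.mp hl).1 w hwzs
          by_contra hxw
          have hxw' : bLexLt x w = true := by
            cases hB : bLexLt x w
            · exact absurd hB hxw
            · rfl
          have := bLexLt_trans z x w hc hxw'
          rw [this] at hzw
          exact Bool.noConfusion hzw
      · rw [if_neg hc]
        rw [List.pairwise_cons]
        constructor
        · intro w hw
          rcases (PySem.List.mem_insertBy _ _ _ _).mp hw with hwx | hwzs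
          · subst hwx
            cases hB : bLexLt z w
            · rfl
            · exact absurd hB hc
          · exact (List.pairwise_cons.mp hl).1 w hwzs
        · exact ihz (List.pairwise_cons.mp hl).2
  have hfold : ∀ (l : List (Int × Int)) (acc : List (Int × Int)),
      List.Pairwise (fun a b => bLexLt a b = false) acc →
      List.Pairwise (fun a b => bLexLt a b = false)
        (l.foldl (fun acc x => PySem.List.insertBy
          (fun a b => (decide (b.1 < a.1) || (!decide (a.1 < b.1) && decide (b.2 < a.2)))) x acc) acc) := by
    intro l
    induction l with
    | nil => intro acc hacc; simpa using hacc
    | cons z zs ihz =>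
      intro acc hacc
      simp only [List.foldl_cons]
      exact ihz _ (hins z acc hacc)
  exact hfold xs [] (by simp)

-- initial invariants and the branch-level equality
lemma branch_eq (deps : List Int) (diff : Int) (hdeps : deps ≠ []) :
    aBranch deps diff = deps.filter
      (fun t => !(PySem.Set.contains (PySem.Set.ofList (bRemovalValues deps diff)) t)) := by
  unfold aBranch bRemovalValues
  dsimp only
  rw [intervals_eq]
  rw [foldl_const_iterate (g := aTrimStep), PySem.List.length_pyRange_one, sub_zero]
  set s0 := PySem.List.sorted deps (fun x => x) false with hs0
  have hs0ne : s0 ≠ [] := by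
    rw [hs0, Ne, PySem.List.sorted_eq_nil_iff]
    exact hdeps
  have hn1 : 0 < s0.length := List.length_pos_iff.mpr hs0ne
  have hcast : PySem.List.len s0 - 1 = ((s0.length - 1 : Nat) : Int) := by
    rw [PySem.List.len_eq]; omega
  -- initial successor map
  have Hnxt0 : ∀ (x y : Int),
      (((PySem.List.pyRange 0 (PySem.List.len s0 - 1) 1).foldl
        (fun d i => d.insert i (i + 1)) PySem.Dict.empty)).get? x = some y ↔
      ∃ (p : Nat), p + 1 < (List.range s0.length).length ∧
        x = (((List.range s0.length).getD p 0 : Nat) : Int) ∧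
        y = (((List.range s0.length).getD (p+1) 0 : Nat) : Int) := by
    intro x y
    rw [hcast, get?_rangeFold]
    constructor
    · rintro ⟨hx0, hxlt, hy⟩
      refine ⟨x.toNat, by simp; omega, ?_, ?_⟩
      · rw [List.getD_eq_getElem (List.range s0.length) 0
          (show x.toNat < (List.range s0.length).length by simp; omega), List.getElem_range]
        omega
      · rw [List.getD_eq_getElem (List.range s0.length) 0
          (show x.toNat + 1 < (List.range s0.length).length by simp; omega), List.getElem_range]
        omega
    · rintro ⟨p, hp, hx, hy⟩
      simp only [List.length_range] at hp
      rw [List.getD_eq_getElem (List.range s0.length) 0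
        (show p < (List.range s0.length).length by simp; omega), List.getElem_range] at hx
      rw [List.getD_eq_getElem (List.range s0.length) 0
        (show p + 1 < (List.range s0.length).length by simp; omega), List.getElem_range] at hy
      refine ⟨by omega, by omega, by omega⟩
  -- initial pending list
  have Hkeys0 : ∀ (p : Nat), p + 1 < (List.range s0.length).length →
      ((s0.getD ((List.range s0.length).getD (p+1) 0) 0
          - s0.getD ((List.range s0.length).getD p 0) 0,
        (((List.range s0.length).getD p 0 : Nat) : Int)) ∈
        PySem.List.sorted2
          ((PySem.List.pyRange 0 (PySem.List.len s0 - 1) 1).map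
            (fun i => (PySem.List.pyGetD s0 (i + 1) 0 - PySem.List.pyGetD s0 i 0, i)))
          (fun e => e.1) (fun e => e.2) true) := by
    intro p hp
    simp only [List.length_range] at hp
    rw [(PySem.List.sorted2_perm _ _ _ _).mem_iff]
    rw [List.getD_eq_getElem (List.range s0.length) 0
      (show p + 1 < (List.range s0.length).length by simp; omega), List.getElem_range]
    rw [List.getD_eq_getElem (List.range s0.length) 0
      (show p < (List.range s0.length).length by simp; omega), List.getElem_range]
    apply List.mem_map.mpr
    refine ⟨(p : Int), ?_, ?_⟩
    · rw [hcast]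
      rw [PySem.List.mem_pyRange_one]
      constructor
      · positivity
      · omega
    · rw [show (p : Int) + 1 = ((p + 1 : Nat) : Int) by push_cast; ring]
      rw [PySem.List.pyGetD_natCast, PySem.List.pyGetD_natCast]
  have hsim := bLoop_sim s0 diff.toNat
    (PySem.List.sorted2
      ((PySem.List.pyRange 0 (PySem.List.len s0 - 1) 1).map
        (fun i => (PySem.List.pyGetD s0 (i + 1) 0 - PySem.List.pyGetD s0 i 0, i)))
      (fun e => e.1) (fun e => e.2) true)
    ((PySem.List.pyRange 0 (PySem.List.len s0 - 1) 1).foldl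
      (fun d i => d.insert i (i + 1)) PySem.Dict.empty)
    [] (List.range s0.length) List.pairwise_lt_range Hnxt0
    (sorted2_desc_pairwise _) Hkeys0
  rw [range_map_getD s0] at hsim
  apply List.filter_congr
  intro t _
  congr 1
  rw [PySem.Set.contains_eq_listContains]
  apply Bool.coe_iff_coe.mp
  simp only [List.contains_iff_mem]
  rw [PySem.Set.mem_ofList]
  rw [hsim t]
  simp

-- ===== VERDICT (by name: the statement is the Claim_ definition above) =====
theorem balance_timetable_spec : Claim_equal_balance_timetable := by
  intro up down se _
  unfold Spec_balance_timetable balance_timetable balance_timetable_alt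
  dsimp only
  by_cases h1 : PySem.List.len up = PySem.List.len down
  · rw [if_pos h1, if_pos h1]
  · rw [if_neg h1, if_neg h1]
    by_cases h2 : PySem.List.len down < PySem.List.len up
    · rw [if_pos h2, if_pos h2, branch_eq up _ (by
        intro hE; subst hE
        simp only [PySem.List.len_eq, List.length_nil, Nat.cast_zero] at h2; omega)]
    · rw [if_neg h2, if_neg h2, branch_eq down _ (by
        intro hE; subst hE
        simp only [PySem.List.len_eq, List.length_nil, Nat.cast_zero] at h1 h2; omega)]
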